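-- pv_equiv track=rewrite | github.com/rozennrd/ProjectEuler | 32 - pandigital sum.py | has_no_two_same_digits
-- ===== SOURCE A (Python) =====
-- def has_no_two_same_digits(n):
--     tab = [0]
--     for digit in (str(n)):
--         if digit in tab or digit == '0':
--             return False
--         else:
--             tab.append(digit)
--     return True
-- ===== SOURCE B (Python) =====
-- def has_no_two_same_digits(n):
--     s = str(n)
--     return '0' not in s and len(set(s)) == len(s)
-- ===== Notes on version B (the rewrite author's own statement) =====
-- stated objective: simpler
-- what changed: Replaces the character-by-character scan with a seen-list and early returns by a single closed boolean test: no '0' in str(n) and the set of its characters has the same size as the string.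
import Mathlib
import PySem

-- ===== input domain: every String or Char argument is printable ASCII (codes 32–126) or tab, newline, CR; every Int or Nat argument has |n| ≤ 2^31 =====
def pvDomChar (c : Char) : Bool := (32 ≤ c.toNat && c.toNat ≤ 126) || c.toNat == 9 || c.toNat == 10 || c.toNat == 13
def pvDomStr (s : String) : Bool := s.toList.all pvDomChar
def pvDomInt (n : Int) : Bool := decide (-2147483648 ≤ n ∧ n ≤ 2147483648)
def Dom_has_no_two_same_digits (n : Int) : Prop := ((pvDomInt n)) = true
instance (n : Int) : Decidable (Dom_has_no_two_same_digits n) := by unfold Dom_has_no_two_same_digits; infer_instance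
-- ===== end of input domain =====

-- B replaces A's accumulating seen-list scan with early returns by one closed boolean
-- test on str(n): no '0' character and set-of-characters size equals string length.

-- ===== PORT A =====
-- A's tab is a heterogeneous Python list starting as [0] (an int, never equal to any
-- character); ported literally with a two-constructor value type.
inductive pvTabVal
  | i : Int → pvTabVal
  | c : Char → pvTabVal
deriving DecidableEq, Repr

def pvALoop : List Char → List pvTabVal → Bool
  | [], _ => true
  | d :: rest, tab =>
      if pvTabVal.c d ∈ tab ∨ d = '0' then false
      else pvALoop rest (tab ++ [pvTabVal.c d])

def has_no_two_same_digits (n : Int) : Bool :=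
  pvALoop (PySem.Int.toStr n).toList [pvTabVal.i 0]

-- ===== PORT B =====
def has_no_two_same_digits_alt (n : Int) : Bool :=
  !(PySem.Int.toStr n).toList.contains '0'
    && (PySem.Set.ofList (PySem.Int.toStr n).toList).length == (PySem.Int.toStr n).toList.length

-- ===== PRECONDITION & SPEC =====
def Spec_has_no_two_same_digits (n : Int) (out : Bool) : Prop := out = has_no_two_same_digits_alt n
instance (n : Int) (out : Bool) : Decidable (Spec_has_no_two_same_digits n out) := by unfold Spec_has_no_two_same_digits; infer_instance

-- ===== CLAIM (what is proved, stated in full; the proofs are below) =====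
def Claim_equal_has_no_two_same_digits : Prop := ∀ (n : Int), Dom_has_no_two_same_digits n → Spec_has_no_two_same_digits n (has_no_two_same_digits n)

-- ===== LEMMAS AND PROOFS =====

-- A's loop, started after seen characters `seen` (nodup), decides: no '0' in cs and seen ++ cs is duplicate-free.
theorem pvALoop_eq (cs : List Char) : ∀ (seen : List Char), seen.Nodup →
    pvALoop cs (pvTabVal.i 0 :: seen.map pvTabVal.c)
      = (cs.all (fun c => c ≠ '0') && decide (seen ++ cs).Nodup) := by
  induction cs with
  | nil =>
      intro seen h
      simp [pvALoop, h]
  | cons d rest ih =>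
      intro seen h
      show (if pvTabVal.c d ∈ (pvTabVal.i 0 :: seen.map pvTabVal.c) ∨ d = '0' then false
            else pvALoop rest ((pvTabVal.i 0 :: seen.map pvTabVal.c) ++ [pvTabVal.c d])) = _
      by_cases hd : d ∈ seen ∨ d = '0'
      · have hcond : pvTabVal.c d ∈ (pvTabVal.i 0 :: seen.map pvTabVal.c) ∨ d = '0' := by
          rcases hd with hd | hd
          · exact Or.inl (by simp [hd])
          · exact Or.inr hd
        rw [if_pos hcond]
        rcases hd with hd | hd
        · have hnn : ¬ (seen ++ d :: rest).Nodup := by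
            intro hn
            exact (List.disjoint_of_nodup_append hn) hd (by simp)
          simp [hnn]
        · simp [hd]
      · push Not at hd
        have hnm : ¬ (pvTabVal.c d ∈ (pvTabVal.i 0 :: seen.map pvTabVal.c) ∨ d = '0') := by
          simp [hd.1, hd.2]
        rw [if_neg hnm]
        have hrw : (pvTabVal.i 0 :: seen.map pvTabVal.c) ++ [pvTabVal.c d]
            = pvTabVal.i 0 :: (seen ++ [d]).map pvTabVal.c := by simp
        rw [hrw, ih (seen ++ [d]) (by
          simp [List.nodup_append, h]
          exact fun a ha hae => hd.1 (hae ▸ ha))]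
        have hperm : (seen ++ [d]) ++ rest = seen ++ d :: rest := by simp
        rw [hperm]
        simp [hd.2]

theorem ofList_length_lt_of_not_nodup {α : Type} [DecidableEq α] [BEq α] [LawfulBEq α]
    (xs : List α) (h : ¬ xs.Nodup) : (PySem.Set.ofList xs).length < xs.length := by
  induction xs with
  | nil => simp at h
  | cons x xs ih =>
      rw [PySem.Set.ofList_cons]
      by_cases hx : xs.Nodup
      · have hmem : x ∈ xs := by
          by_contra hxm
          exact h (by simp [List.nodup_cons, hxm, hx])
        have hmem' : x ∈ PySem.Set.ofList xs := by
          rw [PySem.Set.mem_ofList]; exact hmem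
        have hlt : (PySem.Set.discard (PySem.Set.ofList xs) x).length
            < (PySem.Set.ofList xs).length := by
          simp only [PySem.Set.discard]
          exact List.length_filter_lt_length_iff_exists.mpr ⟨x, hmem', by simp⟩
        have hle := PySem.Set.length_ofList_le (xs := xs)
        simp only [List.length_cons]
        omega
      · have hlt := ih hx
        have hle : (PySem.Set.discard (PySem.Set.ofList xs) x).length
            ≤ (PySem.Set.ofList xs).length := by
          simp only [PySem.Set.discard]
          exact List.length_filter_le _ _
        simp only [List.length_cons]
        omega

theorem setCard_eq_decide_nodup {α : Type} [DecidableEq α] [BEq α] [LawfulBEq α] (xs : List α) :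
    ((PySem.Set.ofList xs).length == xs.length) = decide xs.Nodup := by
  by_cases h : xs.Nodup
  · rw [PySem.Set.ofList_eq_self_of_nodup (h := h)]
    simp [h]
  · have hlt := ofList_length_lt_of_not_nodup xs h
    simp [h]
    omega

theorem contains_zero (s : List Char) :
    (!s.contains '0') = s.all (fun c => c ≠ '0') := by
  simp only [List.all_eq_not_any_not]
  induction s with
  | nil => rfl
  | cons c cs ih => simp_all [eq_comm]

-- ===== VERDICT (by name: the statement is the Claim_ definition above) =====
theorem has_no_two_same_digits_spec : Claim_equal_has_no_two_same_digits := by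
  intro n _
  show has_no_two_same_digits n = has_no_two_same_digits_alt n
  unfold has_no_two_same_digits has_no_two_same_digits_alt
  have h := pvALoop_eq (PySem.Int.toStr n).toList [] (by simp)
  simp only [List.map_nil, List.nil_append] at h
  rw [h, setCard_eq_decide_nodup, contains_zero]
  rfl
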